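-- pv_equiv track=rewrite | github.com/hollyzhuang/computational-genomics | project-3/infection_investigator.py | longest_zeros
-- ===== SOURCE A (Python) =====
-- def longest_zeros(count_vector):
--     """Given a count vector, return the start and stop position (inclusive) of
--     the longest string of internal zeros in the vector. If there is no
--     internal string of zeros, return None.
--
--     Examples to understand behavior:
--     input -> output
--     contain valid internal string of zeros:
--     [1, 1, 1, 0, 0, 1, 1] -> (3, 4)
--     [1, 1, 1, 0, 1, 1, 1]  -> (3, 3)
--     [0, 0, 0, 1, 1, 0, 0, 1, 1, 0, 0, 0] -> (5, 6)
--
--     do not contain internal string of zeros: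
--     [0, 0, 0, 1, 1, 1, 1] -> None
--     [1, 1, 1, 1, 0, 0, 0] -> None
--     [0, 0, 0, 0, 0, 0, 0] -> None
--     [1, 1, 1, 1, 1, 1, 1] -> None
--
--     Args:
--         count_vector (list of ints): vector of aligned read counts to the
--         genome.  see: the return value for `read_mapper()`
--
--     Returns:
--         (tuple of (int, int)): the start and stop position (inclusive) of the longest
--         internal string of zeros in the count_vector. If there are no internal
--         runs-of-zero the return will be None.
--     """
--
--     zero_nums = []
--     genome_len = len(count_vector)
--     for i in range(0, genome_len):
--         if count_vector[i] == 0: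
--             zero_nums.append(i)
--
--     if len(zero_nums) == 0:
--         return None
--
--     counter = 1
--     longest_run = {}
--     longest_run[1] = []
--     longest_run[1].append(zero_nums[0])
--     for z in zero_nums[1:]:
--         if (z - longest_run[counter][-1]) == 1:
--             longest_run[counter].append(z)
--         else:
--             counter += 1
--             longest_run[counter] = []
--             longest_run[counter].append(z)
--
--     for run in list(longest_run.keys()):
--         if 0 in longest_run[run] or genome_len-1 in longest_run[run]:
--             del longest_run[run]
--
--     longest = []
--     for run in list(longest_run.values()):
--         if len(run) > len(longest):
--             longest = run
--
--     # There was no run of zeroes found, return None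
--     if len(longest) == 0:
--         return None
--
--     start = longest[0]
--     stop = longest[-1]
--
--     # Return the start and end positions of the longest zeroes (0-indexed)
--     return start, stop
-- ===== SOURCE B (Python) =====
-- def longest_zeros(count_vector):
--     best_start = -1
--     best_stop = -1
--     best_len = 0
--     run_start = None
--     for j, v in enumerate(count_vector):
--         if v == 0:
--             if run_start is None:
--                 run_start = j
--         else:
--             if run_start is not None and run_start > 0 and j - run_start > best_len:
--                 best_start, best_stop, best_len = run_start, j - 1, j - run_start
--             run_start = None
--     # a run still open at the end touches the last index, hence is never internal
--     if best_len == 0: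
--         return None
--     return (best_start, best_stop)
-- ===== Notes on version B (the rewrite author's own statement) =====
-- stated objective: simpler
-- what changed: A collects all zero indices, groups them into runs inside a counter-keyed dict, deletes boundary-touching runs in a second pass and scans the remaining values for the longest; B does a single pass over the vector keeping only the current run's start index and the best internal run seen so far (three scalars), with no index list, dict or filtering passes.
import Mathlib
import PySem

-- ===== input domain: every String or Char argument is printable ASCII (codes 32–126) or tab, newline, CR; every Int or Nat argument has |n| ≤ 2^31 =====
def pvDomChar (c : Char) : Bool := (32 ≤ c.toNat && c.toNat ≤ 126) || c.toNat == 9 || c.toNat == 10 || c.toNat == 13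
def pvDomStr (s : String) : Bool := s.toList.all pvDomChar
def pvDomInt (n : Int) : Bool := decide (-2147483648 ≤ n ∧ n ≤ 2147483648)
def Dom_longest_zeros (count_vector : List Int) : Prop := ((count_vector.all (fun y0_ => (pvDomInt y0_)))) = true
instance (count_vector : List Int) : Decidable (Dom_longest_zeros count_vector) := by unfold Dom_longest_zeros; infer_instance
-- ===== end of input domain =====

-- B replaces A's zero-index list + dict of runs + two filtering passes by one pass
-- over the vector keeping only the current run start and the best internal run (objective: simpler).

-- ===== PORT A =====
def pvAZeroNums (count_vector : List Int) : List Int :=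
  (PySem.List.pyRange 0 (count_vector.length : Int) 1).foldl
    (fun acc i => if PySem.List.pyGet? count_vector i == some 0 then acc ++ [i] else acc) []

-- one iteration of A's run-grouping loop; the `.getD 0` default on the [-1] lookup is never taken
def pvAStep (s : Int × PySem.Dict Int (List Int)) (z : Int) : Int × PySem.Dict Int (List Int) :=
  if z - ((PySem.List.pyGet? (s.2.getD s.1 []) (-1)).getD 0) == 1 then
    (s.1, s.2.modify s.1 [] (fun r => r ++ [z]))
  else
    (s.1 + 1, (s.2.insert (s.1 + 1) []).modify (s.1 + 1) [] (fun r => r ++ [z]))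

-- A's deletion loop over a snapshot of the keys
def pvADelete (genome_len : Int) (d : PySem.Dict Int (List Int)) : PySem.Dict Int (List Int) :=
  d.keys.foldl (fun dd run =>
    if (dd.getD run []).contains 0 || (dd.getD run []).contains (genome_len - 1) then dd.erase run
    else dd) d

def longest_zeros (count_vector : List Int) : Option (Int × Int) :=
  let genome_len : Int := (count_vector.length : Int)
  let zero_nums := pvAZeroNums count_vector
  match zero_nums with
  | [] => none
  | z0 :: rest =>
    let init : Int × PySem.Dict Int (List Int) :=
      (1, (PySem.Dict.empty.insert 1 []).modify 1 [] (fun r => r ++ [z0]))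
    let st := rest.foldl pvAStep init
    let d2 := pvADelete genome_len st.2
    let longest := d2.values.foldl (fun (l : List Int) run => if run.length > l.length then run else l) []
    if longest.length == 0 then none
    else some ((PySem.List.pyGet? longest 0).getD 0, (PySem.List.pyGet? longest (-1)).getD 0)

-- ===== PORT B =====
-- one iteration of B's single pass: jv = (index, value); state = (best (start, stop, len), run_start)
def pvBStep (s : (Int × Int × Int) × Option Int) (jv : Int × Int) : (Int × Int × Int) × Option Int :=
  if jv.2 == 0 then
    (s.1, match s.2 with | none => some jv.1 | some r => some r)
  else
    match s.2 with
    | some r => if r > 0 ∧ jv.1 - r > s.1.2.2 then ((r, jv.1 - 1, jv.1 - r), none) else (s.1, none)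
    | none => (s.1, none)

def longest_zeros_alt (count_vector : List Int) : Option (Int × Int) :=
  let st := (PySem.List.enumerate count_vector).foldl pvBStep ((-1, -1, 0), none)
  if st.1.2.2 == 0 then none else some (st.1.1, st.1.2.1)

-- ===== PRECONDITION & SPEC =====
def Spec_longest_zeros (count_vector : List Int) (out : Option (Int × Int)) : Prop := out = longest_zeros_alt count_vector
instance (count_vector : List Int) (out : Option (Int × Int)) : Decidable (Spec_longest_zeros count_vector out) := by unfold Spec_longest_zeros; infer_instance

-- ===== CLAIM (what is proved, stated in full; the proofs are below) =====
def Claim_equal_longest_zeros : Prop := ∀ (count_vector : List Int), Dom_longest_zeros count_vector → Spec_longest_zeros count_vector (longest_zeros count_vector)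

-- ===== LEMMAS AND PROOFS =====

-- interval [s, s+L-1] as a list
def pvIv (s : Int) (L : Nat) : List Int := (List.range L).map (fun k => s + (k : Int))

-- indices (offset j) of the zeros of a list
def pvZeros (j : Int) : List Int → List Int
  | [] => []
  | v :: r => if v == 0 then j :: pvZeros (j + 1) r else pvZeros (j + 1) r

-- abstract version of A's run-grouping step (same test, on a plain list of runs)
def pvZstep (runs : List (List Int)) (z : Int) : List (List Int) :=
  if z - ((runs.getLast?.getD []).getLast?.getD 0) == 1 then
    runs.dropLast ++ [(runs.getLast?.getD []) ++ [z]]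
  else runs ++ [[z]]

def pvKeep (n : Int) (r : List Int) : Bool := !(r.contains 0 || r.contains (n - 1))

def pvMaxStep (l r : List Int) : List Int := if r.length > l.length then r else l

-- B's best-update, abstracted to act on a closed run given as a list
def pvBstep (b : Int × Int × Int) (r : List Int) : Int × Int × Int :=
  if r.headD 0 > 0 ∧ (r.length : Int) > b.2.2 then (r.headD 0, r.getLastD 0, (r.length : Int)) else b

-- a run closed strictly inside the prefix [0, j-1]
def pvClosedOK (j : Int) (c : List Int) : Prop :=
  ∃ s L, 1 ≤ L ∧ 0 ≤ s ∧ s + (L : Nat) ≤ j - 1 ∧ c = pvIv s L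

-- invariant tying B's scalar state to the chunk list built by A's grouping
def pvInv (j : Int) (C : List (List Int)) (st : (Int × Int × Int) × Option Int) : Prop :=
  0 ≤ j ∧ ∃ Cc, (∀ c ∈ Cc, pvClosedOK j c) ∧ st.1 = Cc.foldl pvBstep (-1, -1, 0) ∧
    ((st.2 = none ∧ C = Cc) ∨
      ∃ r L, 1 ≤ L ∧ 0 ≤ r ∧ r + (L : Nat) = j ∧ st.2 = some r ∧ C = Cc ++ [pvIv r L])

-- the list accumulator of A's final max pass vs B's best triple
def pvRel (l : List Int) (b : Int × Int × Int) : Prop :=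
  (l = [] ∧ b = (-1, -1, 0)) ∨ ∃ s L, 1 ≤ L ∧ l = pvIv s L ∧ b = (s, s + (L : Nat) - 1, ((L : Nat) : Int))

-- common reference: chunks of the zero indices, filtered, longest kept
def pvRef (cv : List Int) : Option (Int × Int) :=
  let n : Int := (cv.length : Int)
  let C := (pvZeros 0 cv).foldl pvZstep []
  let longest := (C.filter (pvKeep n)).foldl pvMaxStep []
  if longest.length == 0 then none else some (longest.headD 0, longest.getLastD 0)

-- items of A's dict: runs keyed 1,2,…  (generalized start key a)
def pvDItems (a : Nat) : List (List Int) → List (Int × List Int)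
  | [] => []
  | r :: rs => ((a : Int), r) :: pvDItems (a + 1) rs

-- ---- basic interval lemmas ----
lemma pvIv_length (s : Int) (L : Nat) : (pvIv s L).length = L := by
  simp [pvIv]

lemma pvIv_one (s : Int) : pvIv s 1 = [s] := by
  simp [pvIv, List.range_succ]

lemma pvIv_headD (s : Int) {L : Nat} (h : 1 ≤ L) : (pvIv s L).headD 0 = s := by
  obtain ⟨L', rfl⟩ : ∃ L', L = L' + 1 := ⟨L - 1, by omega⟩
  simp [pvIv, List.range_succ_eq_map]

lemma pvIv_append (s : Int) (L : Nat) : pvIv s L ++ [s + (L : Nat)] = pvIv s (L + 1) := by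
  simp [pvIv, List.range_succ]

lemma pvIv_getLast? (s : Int) {L : Nat} (h : 1 ≤ L) :
    (pvIv s L).getLast? = some (s + (L : Nat) - 1) := by
  obtain ⟨L', rfl⟩ : ∃ L', L = L' + 1 := ⟨L - 1, by omega⟩
  rw [← pvIv_append, List.getLast?_concat]
  congr 1
  push_cast
  ring

lemma pvIv_getLastD (s : Int) {L : Nat} (h : 1 ≤ L) :
    (pvIv s L).getLastD 0 = s + (L : Nat) - 1 := by
  rw [List.getLastD_eq_getLast?, pvIv_getLast? s h]
  rfl

lemma mem_pvIv {x s : Int} {L : Nat} : x ∈ pvIv s L ↔ s ≤ x ∧ x < s + (L : Nat) := by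
  induction L with
  | zero => simp [pvIv]
  | succ L ih =>
    rw [← pvIv_append, List.mem_append, ih]
    simp only [List.mem_singleton]
    push_cast
    omega

lemma pvClosedOK_mono {j j' : Int} (h : j ≤ j') {c : List Int} :
    pvClosedOK j c → pvClosedOK j' c := by
  rintro ⟨s, L, hL, hs, hle, rfl⟩
  exact ⟨s, L, hL, hs, by omega, rfl⟩

-- ---- B main induction ----
lemma pvB_main : ∀ (rest : List Int) (j : Int) (C : List (List Int)) (st : (Int × Int × Int) × Option Int),
    pvInv j C st →
    pvInv (j + (rest.length : Nat)) ((pvZeros j rest).foldl pvZstep C)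
      ((PySem.List.enumerate rest j).foldl pvBStep st) := by
  intro rest
  induction rest with
  | nil => intro j C st h; simpa using h
  | cons v r ih =>
    intro j C st h
    have hlen : j + (((v :: r).length : Nat) : Int) = (j + 1) + ((r.length : Nat) : Int) := by
      push_cast [List.length_cons]; omega
    rw [hlen, PySem.List.enumerate_cons, List.foldl_cons]
    obtain ⟨hj, Cc, hCc, hb, hdis⟩ := h
    by_cases hv : v = 0
    · subst hv
      rw [show pvZeros j (0 :: r) = j :: pvZeros (j + 1) r from by simp [pvZeros]]
      rw [List.foldl_cons]
      rcases hdis with ⟨hrs, hCeq⟩ | ⟨r0, L, hL, hr0, hsum, hrs, rfl⟩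
      · rw [hCeq]
        have hstep : pvBStep st (j, 0) = (st.1, some j) := by
          simp [pvBStep, hrs]
        have hz : pvZstep Cc j = Cc ++ [pvIv j 1] := by
          rcases List.eq_nil_or_concat Cc with rfl | ⟨Cc', c, hCcat⟩
          · simp [pvZstep, pvIv_one]
          · obtain ⟨s, L, hL, hs, hle, hc⟩ := hCc c (by rw [hCcat]; simp)
            subst hc
            rw [hCcat, List.concat_eq_append]
            have hlast : (((Cc' ++ [pvIv s L]).getLast?.getD []).getLast?.getD 0) = s + (L : Nat) - 1 := by
              rw [List.getLast?_concat]
              simpa using congrArg (Option.getD · 0) (pvIv_getLast? s hL)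
            rw [pvZstep, hlast, if_neg (by simp; omega), pvIv_one]
        rw [hz, hstep]
        exact ih (j + 1) (Cc ++ [pvIv j 1]) (st.1, some j)
          ⟨by omega, Cc, fun c hc => pvClosedOK_mono (by omega) (hCc c hc), hb,
            Or.inr ⟨j, 1, le_refl 1, by omega, by push_cast; ring, rfl, rfl⟩⟩
      · have hstep : pvBStep st (j, 0) = (st.1, some r0) := by
          simp [pvBStep, hrs]
        have hz : pvZstep (Cc ++ [pvIv r0 L]) j = Cc ++ [pvIv r0 (L + 1)] := by
          have hlast : (((Cc ++ [pvIv r0 L]).getLast?.getD []).getLast?.getD 0) = r0 + (L : Nat) - 1 := by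
            rw [List.getLast?_concat]
            simpa using congrArg (Option.getD · 0) (pvIv_getLast? r0 hL)
          rw [pvZstep, if_pos (by rw [hlast]; simp; omega)]
          rw [List.dropLast_concat, List.getLast?_concat]
          have : (Option.getD (some (pvIv r0 L)) []) ++ [j] = pvIv r0 (L + 1) := by
            simp only [Option.getD_some]
            rw [show j = r0 + (L : Nat) from hsum.symm]
            exact pvIv_append r0 L
          rw [this]
        rw [hz, hstep]
        exact ih (j + 1) (Cc ++ [pvIv r0 (L + 1)]) (st.1, some r0)
          ⟨by omega, Cc, fun c hc => pvClosedOK_mono (by omega) (hCc c hc), hb,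
            Or.inr ⟨r0, L + 1, by omega, hr0, by push_cast at hsum ⊢; omega, rfl, rfl⟩⟩
    · rw [show pvZeros j (v :: r) = pvZeros (j + 1) r from by simp [pvZeros, hv]]
      rcases hdis with ⟨hrs, hCeq⟩ | ⟨r0, L, hL, hr0, hsum, hrs, rfl⟩
      · rw [hCeq]
        have hstep : pvBStep st (j, v) = (st.1, none) := by
          simp [pvBStep, hrs, hv]
        rw [hstep]
        exact ih (j + 1) Cc (st.1, none)
          ⟨by omega, Cc, fun c hc => pvClosedOK_mono (by omega) (hCc c hc), hb, Or.inl ⟨rfl, rfl⟩⟩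
      · have hstep : pvBStep st (j, v) = (pvBstep st.1 (pvIv r0 L), none) := by
          simp only [pvBStep, pvBstep, hrs, hv, beq_iff_eq,
            pvIv_headD r0 hL, pvIv_getLastD r0 hL, pvIv_length]
          have h1 : j - r0 = ((L : Nat) : Int) := by omega
          have h2 : j - 1 = r0 + ((L : Nat) : Int) - 1 := by omega
          rw [h1, h2, if_neg (id : ¬False)]
          split_ifs <;> rfl
        rw [hstep]
        exact ih (j + 1) (Cc ++ [pvIv r0 L]) (pvBstep st.1 (pvIv r0 L), none)
          ⟨by omega, Cc ++ [pvIv r0 L],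
           by
             intro c hc
             rcases List.mem_append.mp hc with hc' | hc'
             · exact pvClosedOK_mono (by omega) (hCc c hc')
             · rw [List.mem_singleton.mp hc']
               exact ⟨r0, L, hL, hr0, by omega, rfl⟩,
           by simp [List.foldl_append, hb],
           Or.inl ⟨rfl, rfl⟩⟩

lemma pick_agree (n : Int) : ∀ (Cc : List (List Int)) (l : List Int) (b : Int × Int × Int),
    (∀ c ∈ Cc, pvClosedOK n c) → pvRel l b →
    pvRel ((Cc.filter (pvKeep n)).foldl pvMaxStep l) (Cc.foldl pvBstep b) := by
  intro Cc
  induction Cc with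
  | nil => intro l b _ h; simpa using h
  | cons c Cc ih =>
    intro l b hC hrel
    obtain ⟨s, L, hL, hs, hle, hc⟩ := hC c (by simp)
    subst hc
    have hC' : ∀ c ∈ Cc, pvClosedOK n c := fun c hc => hC c (by simp [hc])
    by_cases hs0 : s = 0
    · subst hs0
      have hkeep : pvKeep n (pvIv 0 L) = false := by
        have h0 : (pvIv 0 L).contains 0 = true := by
          rw [List.contains_iff_mem, mem_pvIv]
          omega
        rw [pvKeep, h0]
        rfl
      have hbs : pvBstep b (pvIv 0 L) = b := by
        rw [pvBstep, if_neg]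
        rw [pvIv_headD 0 hL]
        simp
      rw [List.filter_cons, List.foldl_cons, hkeep, hbs]
      simp only [Bool.false_eq_true, if_false]
      exact ih l b hC' hrel
    · have hkeep : pvKeep n (pvIv s L) = true := by
        have h0 : (pvIv s L).contains 0 = false := by
          rw [← Bool.not_eq_true, List.contains_iff_mem, mem_pvIv]
          omega
        have h1 : (pvIv s L).contains (n - 1) = false := by
          rw [← Bool.not_eq_true, List.contains_iff_mem, mem_pvIv]
          omega
        rw [pvKeep, h0, h1]
        rfl
      rw [List.filter_cons, hkeep]
      simp only [if_true]
      rw [List.foldl_cons, List.foldl_cons]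
      have hmax : pvMaxStep l (pvIv s L) = if (pvIv s L).length > l.length then pvIv s L else l := rfl
      rcases hrel with ⟨rfl, rfl⟩ | ⟨s', L', hL', rfl, rfl⟩
      · have hm : pvMaxStep [] (pvIv s L) = pvIv s L := by
          rw [hmax, if_pos]
          rw [pvIv_length]
          simpa using hL
        have hb : pvBstep (-1, -1, 0) (pvIv s L) = (s, s + (L : Nat) - 1, ((L : Nat) : Int)) := by
          rw [pvBstep, if_pos]
          · rw [pvIv_headD s hL, pvIv_getLastD s hL, pvIv_length]
          · rw [pvIv_headD s hL, pvIv_length]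
            constructor
            · omega
            · show ((L : Nat) : Int) > 0
              omega
        rw [hm, hb]
        exact ih _ _ hC' (Or.inr ⟨s, L, hL, rfl, rfl⟩)
      · by_cases hLL : L' < L
        · have hm : pvMaxStep (pvIv s' L') (pvIv s L) = pvIv s L := by
            rw [hmax, if_pos]
            rw [pvIv_length, pvIv_length]
            omega
          have hb : pvBstep (s', s' + (L' : Nat) - 1, ((L' : Nat) : Int)) (pvIv s L)
              = (s, s + (L : Nat) - 1, ((L : Nat) : Int)) := by
            rw [pvBstep, if_pos]
            · rw [pvIv_headD s hL, pvIv_getLastD s hL, pvIv_length]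
            · rw [pvIv_headD s hL, pvIv_length]
              constructor
              · omega
              · show ((L : Nat) : Int) > ((L' : Nat) : Int)
                omega
          rw [hm, hb]
          exact ih _ _ hC' (Or.inr ⟨s, L, hL, rfl, rfl⟩)
        · have hm : pvMaxStep (pvIv s' L') (pvIv s L) = pvIv s' L' := by
            rw [hmax, if_neg]
            rw [pvIv_length, pvIv_length]
            omega
          have hb : pvBstep (s', s' + (L' : Nat) - 1, ((L' : Nat) : Int)) (pvIv s L)
              = (s', s' + (L' : Nat) - 1, ((L' : Nat) : Int)) := by
            rw [pvBstep, if_neg]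
            rw [pvIv_headD s hL, pvIv_length]
            rintro ⟨-, hgt⟩
            have : ((L : Nat) : Int) > ((L' : Nat) : Int) := hgt
            omega
          rw [hm, hb]
          exact ih _ _ hC' (Or.inr ⟨s', L', hL', rfl, rfl⟩)

lemma B_eq_ref (cv : List Int) : longest_zeros_alt cv = pvRef cv := by
  have h := pvB_main cv 0 [] ((-1, -1, 0), none)
    ⟨le_refl 0, [], by simp, rfl, Or.inl ⟨rfl, rfl⟩⟩
  rw [zero_add] at h
  obtain ⟨-, Cc, hCc, hb, hdis⟩ := h
  have hfilt : (((pvZeros 0 cv).foldl pvZstep []).filter (pvKeep ((cv.length : Nat) : Int)))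
      = Cc.filter (pvKeep ((cv.length : Nat) : Int)) := by
    rcases hdis with ⟨-, hCeq⟩ | ⟨r, L, hL, hr, hsum, -, hCeq⟩
    · rw [hCeq]
    · rw [hCeq, List.filter_append]
      have : pvKeep ((cv.length : Nat) : Int) (pvIv r L) = false := by
        have hm : (pvIv r L).contains (((cv.length : Nat) : Int) - 1) = true := by
          rw [List.contains_iff_mem, mem_pvIv]
          omega
        rw [pvKeep, hm]
        simp
      simp [this]
  have hrel := pick_agree ((cv.length : Nat) : Int) Cc [] (-1, -1, 0) hCc (Or.inl ⟨rfl, rfl⟩)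
  rw [← hfilt, ← hb] at hrel
  simp only [longest_zeros_alt, pvRef]
  rcases hrel with ⟨hl, hbv⟩ | ⟨s, L, hL, hl, hbv⟩
  · rw [hl, hbv]
    simp
  · rw [hl, hbv]
    have hL0 : ¬ (((L : Nat) : Int) == 0) = true := by simp; omega
    have hl0 : ¬ ((pvIv s L).length == 0) = true := by rw [pvIv_length]; simp; omega
    rw [if_neg hL0, if_neg hl0, pvIv_headD s hL, pvIv_getLastD s hL]

-- ---- A side ----
lemma zeros_range : ∀ (suf pre : List Int),
    (PySem.List.pyRange ((pre.length : Nat) : Int) (((pre.length : Nat) : Int) + ((suf.length : Nat) : Int)) 1).filter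
      (fun i => PySem.List.pyGet? (pre ++ suf) i == some 0)
      = pvZeros ((pre.length : Nat) : Int) suf := by
  intro suf
  induction suf with
  | nil =>
    intro pre
    rw [PySem.List.pyRange_one_eq_nil (by simp)]
    rfl
  | cons v r ih =>
    intro pre
    rw [PySem.List.pyRange_one_cons (by push_cast [List.length_cons]; omega)]
    rw [List.filter_cons]
    have hget : PySem.List.pyGet? (pre ++ v :: r) ((pre.length : Nat) : Int) = some v :=
      PySem.List.pyGet?_append_length pre r v
    have harg : ((pre.length : Nat) : Int) + 1 = (((pre ++ [v]).length : Nat) : Int) := by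
      simp only [List.length_append, List.length_cons, List.length_nil]; push_cast; omega
    have harg2 : ((pre.length : Nat) : Int) + (((v :: r).length : Nat) : Int)
        = (((pre ++ [v]).length : Nat) : Int) + (((r).length : Nat) : Int) := by
      simp only [List.length_append, List.length_cons, List.length_nil]; push_cast; omega
    have hlist : pre ++ v :: r = (pre ++ [v]) ++ r := by simp
    have htail : (PySem.List.pyRange (((pre.length : Nat) : Int) + 1)
          (((pre.length : Nat) : Int) + (((v :: r).length : Nat) : Int)) 1).filter
        (fun i => PySem.List.pyGet? (pre ++ v :: r) i == some 0) = pvZeros (((pre.length : Nat) : Int) + 1) r := by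
      rw [harg, harg2, hlist, ih (pre ++ [v]), ← harg]
    rw [htail, pvZeros, hget]
    by_cases hv : v = 0
    · subst hv; simp
    · simp [hv]

lemma A_zeros (cv : List Int) : pvAZeroNums cv = pvZeros 0 cv := by
  have h := zeros_range cv []
  simp only [List.length_nil, Nat.cast_zero, List.nil_append, zero_add] at h
  rw [pvAZeroNums, PySem.List.foldl_append_if_eq_filter, List.nil_append, h]

lemma pvDItems_append (r : List Int) : ∀ (runs : List (List Int)) (a : Nat),
    pvDItems a (runs ++ [r]) = pvDItems a runs ++ [((((a + runs.length : Nat)) : Int), r)] := by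
  intro runs
  induction runs with
  | nil => intro a; simp [pvDItems]
  | cons r0 rs ih =>
    intro a
    simp only [List.cons_append, pvDItems]
    rw [ih (a + 1)]
    have h : (a + 1) + rs.length = a + (r0 :: rs).length := by simp [List.length_cons]; omega
    rw [h]

lemma key_lt_pvDItems : ∀ (runs : List (List Int)) (a : Nat) (p : Int × List Int),
    p ∈ pvDItems a runs → (a : Int) ≤ p.1 ∧ p.1 < (a : Int) + runs.length := by
  intro runs
  induction runs with
  | nil => intro a p h; simp [pvDItems] at h
  | cons r0 rs ih =>
    intro a p h
    simp only [pvDItems, List.mem_cons] at h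
    rcases h with rfl | h
    · simp [List.length_cons]
    · have := ih (a + 1) p h
      simp [List.length_cons] at this ⊢
      omega

lemma get?_pvDItems_last : ∀ (runs : List (List Int)) (a : Nat) (r : List Int),
    (PySem.Dict.mk (pvDItems a (runs ++ [r]))).get? (((a + runs.length : Nat) : Int)) = some r := by
  intro runs
  induction runs with
  | nil =>
    intro a r
    simp only [List.nil_append, pvDItems]
    rw [PySem.Dict.get?_mk_cons]
    simp
  | cons r0 rs ih =>
    intro a r
    simp only [List.cons_append, pvDItems]
    rw [PySem.Dict.get?_mk_cons, if_neg (by simp [List.length_cons]; omega)]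
    have h : a + (r0 :: rs).length = (a + 1) + rs.length := by simp [List.length_cons]; omega
    rw [h]
    exact ih (a + 1) r

lemma not_contains_pvDItems (runs : List (List Int)) (a : Nat) (k : Int)
    (hk : (a : Int) + runs.length ≤ k) :
    (PySem.Dict.mk (pvDItems a runs)).contains k = false := by
  have : ∀ p ∈ pvDItems a runs, ¬ ((fun (p : Int × List Int) => p.1 == k) p = true) := by
    intro p hp
    have := key_lt_pvDItems runs a p hp
    simp
    omega
  exact List.any_eq_false.mpr this

lemma insert_pvDItems_last (runs : List (List Int)) (a : Nat) (r v : List Int) :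
    (PySem.Dict.mk (pvDItems a (runs ++ [r]))).insert (((a + runs.length : Nat) : Int)) v
      = PySem.Dict.mk (pvDItems a (runs ++ [v])) := by
  have hcont : (PySem.Dict.mk (pvDItems a (runs ++ [r]))).contains (((a + runs.length : Nat) : Int)) = true := by
    rw [PySem.Dict.contains_eq_isSome_get?, get?_pvDItems_last]
    rfl
  show (if _ = true then _ else _) = _
  rw [if_pos hcont]
  apply PySem.Dict.ext
  show (pvDItems a (runs ++ [r])).map _ = pvDItems a (runs ++ [v])
  rw [pvDItems_append, pvDItems_append, List.map_append]
  congr 1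
  · have h : ∀ p ∈ pvDItems a runs,
        (fun (p : Int × List Int) => if (p.1 == (((a + runs.length : Nat)) : Int)) = true
          then ((((a + runs.length : Nat)) : Int), v) else p) p = id p := by
      intro p hp
      have := key_lt_pvDItems runs a p hp
      simp only [id_eq]
      rw [if_neg (by simp; omega)]
    exact (List.map_congr_left h).trans (List.map_id _)
  · simp

lemma pvZstep_ne_nil (runs : List (List Int)) (z : Int) : pvZstep runs z ≠ [] := by
  rw [pvZstep]
  split_ifs <;> simp

lemma dictfold : ∀ (rest : List Int) (runs : List (List Int)), runs ≠ [] →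
    rest.foldl pvAStep ((((runs.length : Nat)) : Int), PySem.Dict.mk (pvDItems 1 runs))
      = (((((rest.foldl pvZstep runs).length : Nat)) : Int),
          PySem.Dict.mk (pvDItems 1 (rest.foldl pvZstep runs))) := by
  intro rest
  induction rest with
  | nil => intro runs _; rfl
  | cons z rest ih =>
    intro runs hne
    rw [List.foldl_cons, List.foldl_cons]
    have hstep : pvAStep ((((runs.length : Nat)) : Int), PySem.Dict.mk (pvDItems 1 runs)) z
        = ((((pvZstep runs z).length : Nat) : Int), PySem.Dict.mk (pvDItems 1 (pvZstep runs z))) := by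
      rcases List.eq_nil_or_concat runs with rfl | ⟨runs', rlast, hcat⟩
      · exact absurd rfl hne
      rw [hcat, List.concat_eq_append]
      have hkey : ((((runs' ++ [rlast]).length : Nat)) : Int) = (((1 + runs'.length : Nat)) : Int) := by
        simp [List.length_append]; omega
      have hgetD : (PySem.Dict.mk (pvDItems 1 (runs' ++ [rlast]))).getD
          ((((runs' ++ [rlast]).length : Nat)) : Int) [] = rlast := by
        rw [PySem.Dict.getD_eq_get?_getD, hkey, get?_pvDItems_last]
        rfl
      have hlastchunk : (runs' ++ [rlast]).getLast?.getD [] = rlast := by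
        rw [List.getLast?_concat]
        rfl
      rw [pvAStep, pvZstep]
      simp only [hgetD, PySem.List.pyGet?_neg_one, hlastchunk]
      by_cases hcond : (z - rlast.getLast?.getD 0 == 1) = true
      · rw [if_pos hcond, if_pos hcond]
        rw [List.dropLast_concat]
        have hmod : (PySem.Dict.mk (pvDItems 1 (runs' ++ [rlast]))).modify
            ((((runs' ++ [rlast]).length : Nat)) : Int) [] (fun r => r ++ [z])
            = PySem.Dict.mk (pvDItems 1 (runs' ++ [rlast ++ [z]])) := by
          rw [PySem.Dict.modify, hgetD, hkey, insert_pvDItems_last]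
        rw [hmod]
        have : ((((runs' ++ [rlast]).length : Nat)) : Int) = ((((runs' ++ [rlast ++ [z]]).length : Nat)) : Int) := by
          simp [List.length_append]
        rw [this]
      · rw [if_neg hcond, if_neg hcond]
        have hkey2 : ((((runs' ++ [rlast]).length : Nat)) : Int) + 1
            = (((1 + (runs' ++ [rlast]).length : Nat)) : Int) := by
          push_cast; omega
        have hfresh : (PySem.Dict.mk (pvDItems 1 (runs' ++ [rlast]))).contains
            ((((1 + (runs' ++ [rlast]).length : Nat)) : Int)) = false := by
          apply not_contains_pvDItems
          push_cast; omega
        have hins : (PySem.Dict.mk (pvDItems 1 (runs' ++ [rlast]))).insert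
            ((((1 + (runs' ++ [rlast]).length : Nat)) : Int)) []
            = PySem.Dict.mk (pvDItems 1 ((runs' ++ [rlast]) ++ [[]])) := by
          show (if _ = true then _ else _) = _
          rw [if_neg (by rw [hfresh]; simp)]
          apply PySem.Dict.ext
          rw [pvDItems_append ([] : List Int) (runs' ++ [rlast]) 1]
        have hgetD2 : (PySem.Dict.mk (pvDItems 1 ((runs' ++ [rlast]) ++ [[]]))).getD
            ((((1 + (runs' ++ [rlast]).length : Nat)) : Int)) [] = ([] : List Int) := by
          rw [PySem.Dict.getD_eq_get?_getD, get?_pvDItems_last]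
          rfl
        have hmod2 : (PySem.Dict.mk (pvDItems 1 ((runs' ++ [rlast]) ++ [[]]))).modify
            ((((1 + (runs' ++ [rlast]).length : Nat)) : Int)) [] (fun r => r ++ [z])
            = PySem.Dict.mk (pvDItems 1 ((runs' ++ [rlast]) ++ [[z]])) := by
          rw [PySem.Dict.modify, hgetD2, insert_pvDItems_last]
          simp
        rw [hkey2, hins, hmod2]
        have : (((1 + (runs' ++ [rlast]).length : Nat)) : Int)
            = (((((runs' ++ [rlast]) ++ [[z]]).length : Nat)) : Int) := by
          simp [List.length_append]; omega
        rw [this]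
    rw [hstep]
    exact ih (pvZstep runs z) (pvZstep_ne_nil runs z)

lemma get?_mk_middle : ∀ (pre : List (Int × List Int)) (k : Int) (v : List Int)
    (post : List (Int × List Int)), k ∉ pre.map Prod.fst →
    (PySem.Dict.mk (pre ++ (k, v) :: post)).get? k = some v := by
  intro pre
  induction pre with
  | nil =>
    intro k v post _
    rw [List.nil_append, PySem.Dict.get?_mk_cons]
    simp
  | cons p pre ih =>
    intro k v post h
    obtain ⟨k0, v0⟩ := p
    have h' : ¬ k = k0 ∧ k ∉ pre.map Prod.fst := by simpa using h
    rw [List.cons_append, PySem.Dict.get?_mk_cons, if_neg (by simp; exact fun he => h'.1 he.symm)]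
    exact ih k v post h'.2

lemma filter_ne_keys : ∀ (l : List (Int × List Int)) (k : Int), k ∉ l.map Prod.fst →
    l.filter (fun p => !(p.1 == k)) = l := by
  intro l
  induction l with
  | nil => intro k _; rfl
  | cons p l ih =>
    intro k h
    have h' : ¬ k = p.1 ∧ k ∉ l.map Prod.fst := by simpa using h
    rw [List.filter_cons, if_pos (by simp; exact fun he => h'.1 he.symm), ih k h'.2]

lemma erase_fold (cond : List Int → Bool) : ∀ (post pre : List (Int × List Int)),
    ((pre ++ post).map Prod.fst).Nodup →
    (post.map Prod.fst).foldl
      (fun dd k => if cond (dd.getD k []) then dd.erase k else dd)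
      (PySem.Dict.mk (pre ++ post))
    = PySem.Dict.mk (pre ++ post.filter (fun p => !cond p.2)) := by
  intro post
  induction post with
  | nil => intro pre _; simp
  | cons p post ih =>
    intro pre hnd
    obtain ⟨k0, v0⟩ := p
    have h1 : (pre.map Prod.fst ++ k0 :: post.map Prod.fst).Nodup := by
      simpa using hnd
    have hk0pre : k0 ∉ pre.map Prod.fst := by
      intro hmem
      exact (List.disjoint_of_nodup_append h1) hmem (by simp)
    have hk0post : k0 ∉ post.map Prod.fst :=
      (List.nodup_cons.mp h1.of_append_right).1
    have hget : (PySem.Dict.mk (pre ++ (k0, v0) :: post)).getD k0 [] = v0 := by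
      rw [PySem.Dict.getD_eq_get?_getD, get?_mk_middle pre k0 v0 post hk0pre]
      rfl
    simp only [List.map_cons, List.foldl_cons]
    rw [hget]
    by_cases hc : cond v0 = true
    · rw [if_pos hc]
      have herase : (PySem.Dict.mk (pre ++ (k0, v0) :: post)).erase k0 = PySem.Dict.mk (pre ++ post) := by
        show PySem.Dict.mk ((pre ++ (k0, v0) :: post).filter fun p => !(p.1 == k0)) = _
        rw [List.filter_append, filter_ne_keys pre k0 hk0pre, List.filter_cons,
          if_neg (by simp), filter_ne_keys post k0 hk0post]
      rw [herase]
      have hnd2 : ((pre ++ post).map Prod.fst).Nodup := by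
        refine List.Nodup.sublist (List.Sublist.map Prod.fst ?_) hnd
        exact List.Sublist.append_left (List.sublist_cons_self (k0, v0) post) pre
      rw [ih pre hnd2, List.filter_cons, if_neg (by simp [hc])]
    · rw [if_neg hc]
      have hassoc : pre ++ (k0, v0) :: post = (pre ++ [(k0, v0)]) ++ post := by simp
      rw [hassoc, ih (pre ++ [(k0, v0)]) (by rw [← hassoc]; exact hnd)]
      rw [List.filter_cons, if_pos (by simp [hc])]
      simp

lemma nodup_keys_pvDItems : ∀ (runs : List (List Int)) (a : Nat),
    ((pvDItems a runs).map Prod.fst).Nodup := by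
  intro runs
  induction runs with
  | nil => intro a; simp [pvDItems]
  | cons r0 rs ih =>
    intro a
    simp only [pvDItems, List.map_cons]
    refine List.nodup_cons.mpr ⟨?_, ih (a + 1)⟩
    intro hmem
    obtain ⟨p, hp, hfst⟩ := List.mem_map.mp hmem
    have := key_lt_pvDItems rs (a + 1) p hp
    rw [hfst] at this
    push_cast at this
    omega

lemma snd_pvDItems : ∀ (runs : List (List Int)) (a : Nat),
    (pvDItems a runs).map Prod.snd = runs := by
  intro runs
  induction runs with
  | nil => intro a; rfl
  | cons r0 rs ih => intro a; simp [pvDItems, ih (a + 1)]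

lemma map_snd_filter (cond : List Int → Bool) : ∀ (l : List (Int × List Int)),
    (l.filter (fun p => !cond p.2)).map Prod.snd = (l.map Prod.snd).filter (fun r => !cond r) := by
  intro l
  induction l with
  | nil => rfl
  | cons p l ih =>
    by_cases hc : cond p.2 = true <;>
      simp [hc, ih]

lemma pvZstep_nil (z : Int) : pvZstep [] z = [[z]] := by
  rw [pvZstep]
  split_ifs <;> rfl

lemma A_eq_ref (cv : List Int) : longest_zeros cv = pvRef cv := by
  cases hz : pvZeros 0 cv with
  | nil =>
    have hA : pvAZeroNums cv = [] := by rw [A_zeros, hz]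
    simp [longest_zeros, pvRef, hA, hz]
  | cons z0 rest =>
    have hA : pvAZeroNums cv = z0 :: rest := by rw [A_zeros, hz]
    simp only [longest_zeros, pvRef, hA, hz]
    have hinit : ((1 : Int), (PySem.Dict.empty.insert 1 []).modify 1 [] (fun r => r ++ [z0]))
        = (((([[z0]] : List (List Int)).length : Nat) : Int), PySem.Dict.mk (pvDItems 1 [[z0]])) := rfl
    rw [hinit, dictfold rest [[z0]] (by simp)]
    rw [List.foldl_cons, pvZstep_nil]
    have hdel : pvADelete ((cv.length : Nat) : Int)
        (PySem.Dict.mk (pvDItems 1 (rest.foldl pvZstep [[z0]])))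
        = PySem.Dict.mk ((pvDItems 1 (rest.foldl pvZstep [[z0]])).filter
            (fun p => !(p.2.contains 0 || p.2.contains (((cv.length : Nat) : Int) - 1)))) := by
      have h := erase_fold
        (fun v => v.contains 0 || v.contains (((cv.length : Nat) : Int) - 1))
        (pvDItems 1 (rest.foldl pvZstep [[z0]])) []
        (by simpa using nodup_keys_pvDItems (rest.foldl pvZstep [[z0]]) 1)
      simpa [pvADelete] using h
    rw [hdel]
    have hval : (PySem.Dict.mk ((pvDItems 1 (rest.foldl pvZstep [[z0]])).filter
        (fun p => !(p.2.contains 0 || p.2.contains (((cv.length : Nat) : Int) - 1))))).values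
        = (rest.foldl pvZstep [[z0]]).filter (pvKeep ((cv.length : Nat) : Int)) := by
      show ((pvDItems 1 (rest.foldl pvZstep [[z0]])).filter _).map Prod.snd = _
      rw [map_snd_filter (fun v => v.contains 0 || v.contains (((cv.length : Nat) : Int) - 1)),
        snd_pvDItems]
      rfl
    rw [hval]
    have hfun : (fun (l : List Int) run => if l.length < run.length then run else l) = pvMaxStep := by
      funext l r
      rw [pvMaxStep]
    rw [hfun]
    have hfin : ∀ (l : List Int),
        (if (l.length == 0) = true then none
          else some ((PySem.List.pyGet? l 0).getD 0, (PySem.List.pyGet? l (-1)).getD 0))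
        = (if (l.length == 0) = true then (none : Option (Int × Int))
            else some (l.headD 0, l.getLastD 0)) := by
      intro l
      cases l with
      | nil => rfl
      | cons x xs =>
        simp [PySem.List.pyGet?_neg_one, List.getLastD_eq_getLast?]
    exact hfin _

-- ===== VERDICT (by name: the statement is the Claim_ definition above) =====
theorem longest_zeros_spec : Claim_equal_longest_zeros := by
  intro cv _
  unfold Spec_longest_zeros
  rw [A_eq_ref, B_eq_ref]
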